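-- pv_equiv track=rewrite | github.com/Clinohub/100_Days_of_Python | Challenges/Palindrome Checker with Wildcard.py | is_wildcard_palindrome
-- ===== SOURCE A (Python) =====
-- def replace_wildcards(wildcardList,empty_wildcardList,n):
--     count = 0
--     asterick_positions = []
--     for wild_card in wildcardList:
--         if wild_card == '*':
--             asterick_positions.append(count)
--         count +=1
--
--     for position in asterick_positions:
--         wildcardList[position] = empty_wildcardList[n]
--
--     return wildcardList
--
-- def is_palindrome(check):
--     checkList =[]
--     for i in check:
--         checkList.append(i)
--     reverse_checkList=checkList[:]
--     reverse_checkList.reverse()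
--
--     return checkList == reverse_checkList
--
-- def is_wildcard_palindrome(text):
--     if is_palindrome(text) == True:
--         return True
--     elif '*' in text:
--         text_as_list = []
--         removeWild = []
--         for char in text:
--             text_as_list.append(char)
--             if not char == '*':
--                 removeWild.append(char)
--
--         for number in range(len(removeWild)):
--             copy_text_as_list=text_as_list[:]
--             if is_palindrome(replace_wildcards(copy_text_as_list,removeWild,number))==True:
--                 return True
--         return False
--     else:
--         return False
-- ===== SOURCE B (Python) =====
-- def is_wildcard_palindrome(text):
--     forced = None
--     for a, b in zip(text, reversed(text)):
--         if a != b: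
--             if a == '*':
--                 need = b
--             elif b == '*':
--                 need = a
--             else:
--                 return False
--             if forced is None:
--                 forced = need
--             elif forced != need:
--                 return False
--     return True
-- ===== Notes on version B (the rewrite author's own statement) =====
-- stated objective: faster
-- what changed: Instead of trying every non-'*' character as a fill and re-checking the whole string for palindromicity each time, B makes a single pass over the mirrored pairs (text[i], text[n-1-i]), deriving the forced fill character from any '*'-vs-letter mismatch and failing on any inconsistency.
import Mathlib
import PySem

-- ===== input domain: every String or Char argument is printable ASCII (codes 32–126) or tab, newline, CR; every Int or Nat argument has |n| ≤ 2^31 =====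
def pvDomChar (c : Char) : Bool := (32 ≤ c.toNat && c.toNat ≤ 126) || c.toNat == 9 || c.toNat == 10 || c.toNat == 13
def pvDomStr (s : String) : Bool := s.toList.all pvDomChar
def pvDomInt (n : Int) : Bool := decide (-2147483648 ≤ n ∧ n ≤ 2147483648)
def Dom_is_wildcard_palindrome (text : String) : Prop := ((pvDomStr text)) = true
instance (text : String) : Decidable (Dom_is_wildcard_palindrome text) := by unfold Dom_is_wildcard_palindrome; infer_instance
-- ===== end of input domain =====

-- B replaces A's try-every-fill-character-and-recheck-the-whole-string scan by a single
-- pass over the mirrored pairs that derives the forced fill character and checks consistency.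

-- ===== PORT A =====
-- is_palindrome(check): builds checkList by appending, reverses a copy, compares
def pvPalA (check : List Char) : Bool :=
  let checkList := check.foldl (fun acc i => acc ++ [i]) ([] : List Char)
  let reverseCheckList := checkList.reverse
  checkList == reverseCheckList

-- replace_wildcards(wildcardList, empty_wildcardList, n): collect '*' positions with a
-- counter, then assign empty_wildcardList[n] at each position; at every call site in A the
-- index n satisfies n < len(empty_wildcardList), so getD is exact there
def pvReplaceWildcards (wildcardList emptyWildcardList : List Char) (n : Nat) : List Char :=
  let st := wildcardList.foldl
      (fun (st : Nat × List Nat) c => (st.1 + 1, if c == '*' then st.2 ++ [st.1] else st.2))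
      (0, ([] : List Nat))
  st.2.foldl (fun l p => l.set p (emptyWildcardList.getD n ' ')) wildcardList

-- the 'for number in range(len(removeWild))' loop with its early 'return True'
def pvLoopA (tl rw : List Char) : List Nat → Bool
  | [] => false
  | n :: rest => if pvPalA (pvReplaceWildcards tl rw n) then true else pvLoopA tl rw rest

def is_wildcard_palindrome (text : String) : Bool :=
  if pvPalA text.toList then true
  else if text.toList.contains '*' then  -- '*' in text: a one-char needle is membership
    let st := text.toList.foldl
        (fun (st : List Char × List Char) c =>
          (st.1 ++ [c], if !(c == '*') then st.2 ++ [c] else st.2))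
        (([] : List Char), ([] : List Char))
    pvLoopA st.1 st.2 (List.range st.2.length)
  else false

-- ===== PORT B =====
-- the 'for a, b in zip(text, reversed(text))' loop of Source B, with forced : Option Char
def pvLoopB : List (Char × Char) → Option Char → Bool
  | [], _ => true
  | (a, b) :: rest, forced =>
    if a ≠ b then
      match (if a = '*' then some b else if b = '*' then some a else none : Option Char) with
      | none => false
      | some need =>
        match forced with
        | none => pvLoopB rest (some need)
        | some f => if f ≠ need then false else pvLoopB rest forced
    else pvLoopB rest forced

def is_wildcard_palindrome_alt (text : String) : Bool :=
  pvLoopB (text.toList.zip text.toList.reverse) none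

-- ===== PRECONDITION & SPEC =====
def Spec_is_wildcard_palindrome (text : String) (out : Bool) : Prop := out = is_wildcard_palindrome_alt text
instance (text : String) (out : Bool) : Decidable (Spec_is_wildcard_palindrome text out) := by unfold Spec_is_wildcard_palindrome; infer_instance

-- ===== CLAIM (what is proved, stated in full; the proofs are below) =====
def Claim_equal_is_wildcard_palindrome : Prop := ∀ (text : String), Dom_is_wildcard_palindrome text → Spec_is_wildcard_palindrome text (is_wildcard_palindrome text)

-- ===== LEMMAS AND PROOFS =====

-- filling with c: every '*' replaced by c
def pvFc (c x : Char) : Char := if x = '*' then c else x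
def pvFill (c : Char) (s : List Char) : List Char := s.map (pvFc c)
-- "filling with c makes every mirrored pair of z agree"
def pvFOK (c : Char) (z : List (Char × Char)) : Prop := ∀ p ∈ z, pvFc c p.1 = pvFc c p.2

lemma pvLoopB_some (c : Char) : ∀ z, pvLoopB z (some c) = true ↔ pvFOK c z := by
  intro z
  induction z with
  | nil => simp [pvLoopB, pvFOK]
  | cons p rest ih =>
    obtain ⟨a, b⟩ := p
    by_cases hab : a = b
    · subst hab
      simp [pvLoopB, pvFOK, ih]
    · by_cases ha : a = '*'
      · have hb : b ≠ '*' := fun h => hab (h ▸ ha)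
        by_cases hcb : c = b
        · subst hcb
          simp [pvLoopB, pvFOK, ha, hb, pvFc, ih]
        · simp [pvLoopB, pvFOK, ha, hb, hcb, pvFc]
          exact fun h => absurd h.symm hb
      · by_cases hb : b = '*'
        · by_cases hca : c = a
          · subst hca
            simp [pvLoopB, pvFOK, ha, hb, pvFc, ih]
          · simp [pvLoopB, pvFOK, ha, hb, hca, pvFc]
            exact fun h => absurd h.symm hca
        · simp [pvLoopB, pvFOK, hab, ha, hb, pvFc]

lemma pvLoopB_alleq (f : Option Char) : ∀ z : List (Char × Char),
    (∀ p ∈ z, p.1 = p.2) → pvLoopB z f = true := by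
  intro z
  induction z with
  | nil => simp [pvLoopB]
  | cons p rest ih =>
    obtain ⟨a, b⟩ := p
    intro h
    have hab : a = b := h (a, b) (by simp)
    subst hab
    simpa [pvLoopB] using ih fun p hp => h p (by simp [hp])

lemma pvLoopB_of_FOK (c : Char) : ∀ z, pvFOK c z → pvLoopB z none = true := by
  intro z
  induction z with
  | nil => simp [pvLoopB]
  | cons p rest ih =>
    obtain ⟨a, b⟩ := p
    intro h
    have hpair : pvFc c a = pvFc c b := h (a, b) (by simp)
    have hrest : pvFOK c rest := fun p hp => h p (by simp [hp])
    by_cases hab : a = b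
    · subst hab; simpa [pvLoopB] using ih hrest
    · by_cases ha : a = '*'
      · have hb : b ≠ '*' := fun hx => hab (hx ▸ ha)
        have hcb : c = b := by simpa [pvFc, ha, hb] using hpair
        subst hcb
        simp [pvLoopB, ha, (pvLoopB_some c rest).mpr hrest]
        exact Or.inl fun hx => hb hx.symm
      · by_cases hb : b = '*'
        · have hca : a = c := by simpa [pvFc, ha, hb] using hpair
          subst hca
          simp [pvLoopB, ha, hb, (pvLoopB_some a rest).mpr hrest]
        · exact absurd (by simpa [pvFc, ha, hb] using hpair) hab

lemma pvLoopB_none_sound : ∀ z, pvLoopB z none = true →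
    (∀ p ∈ z, p.1 = p.2) ∨
      ∃ c, c ≠ '*' ∧ (∃ p ∈ z, p.1 = c ∨ p.2 = c) ∧ pvFOK c z := by
  intro z
  induction z with
  | nil => intro _; left; simp
  | cons p rest ih =>
    obtain ⟨a, b⟩ := p
    intro h
    by_cases hab : a = b
    · subst hab
      rcases ih (by simpa [pvLoopB] using h) with h1 | ⟨c, hc, ⟨q, hq, hqc⟩, hfok⟩
      · left; intro p hp
        rcases List.mem_cons.mp hp with rfl | hp
        · rfl
        · exact h1 p hp
      · right
        exact ⟨c, hc, ⟨q, by simp [hq], hqc⟩, fun p hp => by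
          rcases List.mem_cons.mp hp with rfl | hp
          · rfl
          · exact hfok p hp⟩
    · by_cases ha : a = '*'
      · have hb : b ≠ '*' := fun hx => hab (hx ▸ ha)
        have hb' : ¬ ('*' = b) := fun hx => hb hx.symm
        have h' : pvLoopB rest (some b) = true := by
          simpa [pvLoopB, hab, ha, hb'] using h
        have hrest : pvFOK b rest := (pvLoopB_some b rest).mp h'
        right
        refine ⟨b, hb, ⟨(a, b), by simp, by simp⟩, fun p hp => ?_⟩
        rcases List.mem_cons.mp hp with rfl | hp
        · simp [pvFc, ha, hb]
        · exact hrest p hp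
      · by_cases hb : b = '*'
        · have h' : pvLoopB rest (some a) = true := by
            simpa [pvLoopB, hab, ha, hb] using h
          have hrest : pvFOK a rest := (pvLoopB_some a rest).mp h'
          right
          refine ⟨a, ha, ⟨(a, b), by simp, by simp⟩, fun p hp => ?_⟩
          rcases List.mem_cons.mp hp with rfl | hp
          · simp [pvFc, ha, hb]
          · exact hrest p hp
        · exact absurd h (by simp [pvLoopB, hab, ha, hb])

lemma pvPalA_iff (check : List Char) : pvPalA check = true ↔ check = check.reverse := by
  unfold pvPalA
  rw [PySem.List.foldl_append_singleton]
  simp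

def pvStarIdx : List Char → List Nat
  | [] => []
  | c :: t => (if c = '*' then [0] else []) ++ (pvStarIdx t).map (· + 1)

lemma pvPosFold : ∀ (wl : List Char) (k : Nat) (acc : List Nat),
    wl.foldl (fun (st : Nat × List Nat) c => (st.1 + 1, if c == '*' then st.2 ++ [st.1] else st.2)) (k, acc)
      = (k + wl.length, acc ++ (pvStarIdx wl).map (· + k)) := by
  intro wl
  induction wl with
  | nil => simp [pvStarIdx]
  | cons c t ih =>
    intro k acc
    have hmap : (fun x => x + 1 + k) = (fun x : Nat => x + (k + 1)) := by funext x; omega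
    simp only [List.foldl_cons]
    rw [ih]
    by_cases hc : c = '*' <;>
      simp [pvStarIdx, hc, List.map_map, Function.comp_def, hmap, List.append_assoc] <;>
      omega

lemma pvSetFold (e : Char) : ∀ (wl pre : List Char),
    ((pvStarIdx wl).map (· + pre.length)).foldl (fun l p => l.set p e) (pre ++ wl)
      = pre ++ pvFill e wl := by
  intro wl
  induction wl with
  | nil => simp [pvStarIdx, pvFill]
  | cons c t ih =>
    intro pre
    by_cases hc : c = '*'
    · subst hc
      have hstar : pvStarIdx ('*' :: t) = 0 :: (pvStarIdx t).map (· + 1) := by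
        simp [pvStarIdx]
      have h0 : (pre ++ '*' :: t).set pre.length e = (pre ++ [e]) ++ t := by
        simp
      have hmap : (fun x : Nat => x + 1 + pre.length) = (fun x => x + (pre ++ [e]).length) := by
        funext x; simp; omega
      rw [hstar]
      simp only [List.map_cons, List.map_map, Function.comp_def, List.foldl_cons, Nat.zero_add]
      rw [h0, hmap, ih (pre ++ [e])]
      simp [pvFill, pvFc]
    · have hstar : pvStarIdx (c :: t) = (pvStarIdx t).map (· + 1) := by
        simp [pvStarIdx, hc]
      have hmap : (fun x : Nat => x + 1 + pre.length) = (fun x => x + (pre ++ [c]).length) := by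
        funext x; simp; omega
      have hassoc : pre ++ c :: t = (pre ++ [c]) ++ t := by simp
      rw [hstar]
      simp only [List.map_map, Function.comp_def]
      rw [hmap, hassoc, ih (pre ++ [c])]
      simp [pvFill, pvFc, hc]

lemma pvReplace_eq_fill (wl e : List Char) (n : Nat) :
    pvReplaceWildcards wl e n = pvFill (e.getD n ' ') wl := by
  unfold pvReplaceWildcards
  rw [pvPosFold wl 0 []]
  have := pvSetFold (e.getD n ' ') wl []
  simpa using this

lemma pvLoopA_any (tl rw : List Char) : ∀ l,
    pvLoopA tl rw l = l.any (fun n => pvPalA (pvReplaceWildcards tl rw n)) := by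
  intro l
  induction l with
  | nil => simp [pvLoopA]
  | cons n rest ih =>
    simp only [pvLoopA, List.any_cons, ih]
    split_ifs with h <;> simp [h]
lemma pvMapEq {α β : Type} (f : α → β) (l : List α) :
    ∀ l' : List α, l.length = l'.length →
      (l.map f = l'.map f ↔ ∀ p ∈ l.zip l', f p.1 = f p.2) := by
  induction l with
  | nil => intro l' h; cases l' <;> simp_all
  | cons a t ih =>
    intro l' h
    cases l' with
    | nil => simp at h
    | cons b t' =>
      simp only [List.length_cons, Nat.add_right_cancel_iff] at h
      simp [List.zip_cons_cons, ih t' h]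

lemma pvFillPal_iff (c : Char) (s : List Char) :
    (pvFill c s = (pvFill c s).reverse) ↔ pvFOK c (s.zip s.reverse) := by
  unfold pvFill pvFOK
  rw [← List.map_reverse, pvMapEq (pvFc c) s s.reverse (by simp)]

lemma pvPal_iff_pairs (s : List Char) :
    (s = s.reverse) ↔ ∀ p ∈ s.zip s.reverse, p.1 = p.2 := by
  have h := pvMapEq (fun x : Char => x) s s.reverse (by simp)
  simpa using h

-- the pair-building loop of A's main body
lemma pvPairFold (s : List Char) :
    s.foldl (fun (st : List Char × List Char) c =>
        (st.1 ++ [c], if !(c == '*') then st.2 ++ [c] else st.2))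
      (([] : List Char), ([] : List Char))
      = (s, s.filter (fun c => !(c == '*'))) := by
  rw [PySem.List.foldl_prod_mk (fun l c => l ++ [c])
        (fun l c => if !(c == '*') then l ++ [c] else l) s [] []]
  rw [PySem.List.foldl_append_singleton]
  have h2 : List.foldl (fun l c => if (!(c == '*')) = true then l ++ [c] else l) [] s
      = List.filter (fun c => !(c == '*')) s := by
    simpa using PySem.List.foldl_append_if (fun c => !(c == '*')) id s []
  simp only [Prod.mk.injEq]
  refine ⟨by simp, ?_⟩
  simpa using h2

-- characterization of A's result
lemma pvA_iff (text : String) :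
    is_wildcard_palindrome text = true ↔
      (text.toList = text.toList.reverse) ∨
        ('*' ∈ text.toList ∧ ∃ c ∈ text.toList.filter (fun c => !(c == '*')),
          pvFill c text.toList = (pvFill c text.toList).reverse) := by
  have hbody : is_wildcard_palindrome text =
      (if pvPalA text.toList then true
       else if text.toList.contains '*' then
         pvLoopA text.toList (text.toList.filter (fun c => !(c == '*')))
           (List.range (text.toList.filter (fun c => !(c == '*'))).length)
       else false) := by
    simp only [is_wildcard_palindrome, pvPairFold]
  rw [hbody]
  by_cases hpal : pvPalA text.toList = true
  · have h1 := (pvPalA_iff text.toList).mp hpal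
    exact iff_of_true (by simp [hpal]) (Or.inl h1)
  · have hnp : ¬ (text.toList = text.toList.reverse) :=
      fun h => hpal ((pvPalA_iff text.toList).mpr h)
    by_cases hstar : text.toList.contains '*' = true
    · rw [if_neg (by simpa using hpal), if_pos hstar]
      rw [pvLoopA_any, List.any_eq_true]
      constructor
      · rintro ⟨n, hn, hp⟩
        have hn' : n < (text.toList.filter (fun c => !(c == '*'))).length :=
          List.mem_range.mp hn
        rw [pvReplace_eq_fill, List.getD_eq_getElem _ _ hn'] at hp
        refine Or.inr ⟨List.contains_iff_mem.mp hstar,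
          (text.toList.filter (fun c => !(c == '*')))[n], List.getElem_mem hn', ?_⟩
        exact (pvPalA_iff _).mp hp
      · rintro (h | ⟨_, c, hc, hfill⟩)
        · exact absurd h hnp
        · obtain ⟨n, hn, hcn⟩ := List.mem_iff_getElem.mp hc
          refine ⟨n, List.mem_range.mpr hn, ?_⟩
          rw [pvReplace_eq_fill, List.getD_eq_getElem _ _ hn, hcn]
          exact (pvPalA_iff _).mpr hfill
    · have hnstar : '*' ∉ text.toList := fun h => hstar (List.contains_iff_mem.mpr h)
      simp [hpal, hnp, hnstar]

theorem pvMain (text : String) :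
    is_wildcard_palindrome text = is_wildcard_palindrome_alt text := by
  rw [Bool.eq_iff_iff, pvA_iff]
  unfold is_wildcard_palindrome_alt
  constructor
  · rintro (hpal | ⟨hstar, c, hc, hfill⟩)
    · exact pvLoopB_alleq none _ ((pvPal_iff_pairs text.toList).mp hpal)
    · exact pvLoopB_of_FOK c _ ((pvFillPal_iff c text.toList).mp hfill)
  · intro h
    rcases pvLoopB_none_sound _ h with hall | ⟨c, hcne, ⟨p, hp, hpc⟩, hfok⟩
    · exact Or.inl ((pvPal_iff_pairs text.toList).mpr hall)
    · by_cases hpal : text.toList = text.toList.reverse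
      · exact Or.inl hpal
      · have hcs : c ∈ text.toList := by
          obtain ⟨h1, h2⟩ := List.of_mem_zip hp
          rcases hpc with rfl | rfl
          · exact h1
          · exact List.mem_reverse.mp h2
        have hstar : '*' ∈ text.toList := by
          obtain ⟨q, hq, hqne⟩ :
              ∃ q ∈ text.toList.zip text.toList.reverse, q.1 ≠ q.2 := by
            by_contra hno
            push Not at hno
            exact hpal ((pvPal_iff_pairs text.toList).mpr hno)
          have hfq := hfok q hq
          by_cases hq1 : q.1 = '*'
          · exact hq1 ▸ (List.of_mem_zip hq).1
          · by_cases hq2 : q.2 = '*'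
            · exact List.mem_reverse.mp (hq2 ▸ (List.of_mem_zip hq).2)
            · exact absurd (by simpa [pvFc, hq1, hq2] using hfq) hqne
        refine Or.inr ⟨hstar, c, ?_, (pvFillPal_iff c text.toList).mpr hfok⟩
        rw [List.mem_filter]
        exact ⟨hcs, by simp [hcne]⟩

-- ===== VERDICT (by name: the statement is the Claim_ definition above) =====
theorem is_wildcard_palindrome_spec : Claim_equal_is_wildcard_palindrome := by
  intro text _
  unfold Spec_is_wildcard_palindrome
  exact pvMain text
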